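-- pv_equiv track=rewrite | github.com/01223755646/final-project | final_project/final_project/device/tests.py | CheckIDNode
-- ===== SOURCE A (Python) =====
-- def CheckIDNode(typenode, idnode):
--     RLACS_id = ["RLACS%.2d" % i for i in range(100)]
--     RLTDS_id = ["RLTDS%.2d" % i for i in range(100)]
--     THL_SENSOR_id = ["THL%.2d" % i for i in range(100)]
--     if typenode == 'RLACS':
--         if idnode in RLACS_id:
--             return True
--         else:
--             return False
--     elif typenode ==  'RLTDS':
--         if idnode in RLTDS_id:
--             return True
--         else:
--             return False
--     elif typenode == 'THL_SENSOR':
--         if idnode in THL_SENSOR_id: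
--             return True
--         else:
--             return False
--     else:
--         return False
-- ===== SOURCE B (Python) =====
-- def CheckIDNode(typenode, idnode):
--     prefixes = {'RLACS': 'RLACS', 'RLTDS': 'RLTDS', 'THL_SENSOR': 'THL'}
--     prefix = prefixes.get(typenode)
--     if prefix is None:
--         return False
--     rest = idnode[len(prefix):]
--     return (idnode.startswith(prefix) and len(rest) == 2
--             and all(c in '0123456789' for c in rest))
-- ===== Notes on version B (the rewrite author's own statement) =====
-- stated objective: simpler
-- what changed: Replaces building three 100-element id lists and scanning them by a direct structural check: look up the type's prefix in a 3-entry dict, then verify the id is that prefix followed by exactly two ASCII digits.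
import Mathlib
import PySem

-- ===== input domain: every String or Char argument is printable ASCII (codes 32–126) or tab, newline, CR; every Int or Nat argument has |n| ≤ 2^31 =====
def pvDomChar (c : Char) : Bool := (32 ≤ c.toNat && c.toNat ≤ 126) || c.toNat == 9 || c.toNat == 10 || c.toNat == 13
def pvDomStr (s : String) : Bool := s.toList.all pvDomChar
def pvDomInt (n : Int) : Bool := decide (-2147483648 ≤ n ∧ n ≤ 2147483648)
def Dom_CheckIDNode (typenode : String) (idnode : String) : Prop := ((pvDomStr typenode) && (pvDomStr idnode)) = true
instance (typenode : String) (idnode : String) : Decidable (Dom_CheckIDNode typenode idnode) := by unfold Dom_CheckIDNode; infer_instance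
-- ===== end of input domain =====

-- B replaces A's three generated 100-element id lists and the membership scan by a direct prefix + two-digit check (objective: simpler).

-- ===== PORT A =====
-- "%.2d" % i for 0 ≤ i ≤ 99 (the only values A formats): zero-pad str(i) to width 2
def pvFmt2 (i : Int) : List Char :=
  if i < 10 then '0' :: PySem.Int.toChars i else PySem.Int.toChars i

def CheckIDNode (typenode : String) (idnode : String) : Bool :=
  let rlacsId := (PySem.List.pyRange 0 100 1).map (fun i => String.ofList ("RLACS".toList ++ pvFmt2 i))
  let rltdsId := (PySem.List.pyRange 0 100 1).map (fun i => String.ofList ("RLTDS".toList ++ pvFmt2 i))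
  let thlId   := (PySem.List.pyRange 0 100 1).map (fun i => String.ofList ("THL".toList ++ pvFmt2 i))
  if typenode == "RLACS" then
    if rlacsId.contains idnode then true else false
  else if typenode == "RLTDS" then
    if rltdsId.contains idnode then true else false
  else if typenode == "THL_SENSOR" then
    if thlId.contains idnode then true else false
  else false

-- ===== PORT B =====
-- `c in '0123456789'` for the single characters of rest is character membership
def pvIsDigitChar (c : Char) : Bool := "0123456789".toList.contains c

-- idnode.startswith(prefix) and len(rest) == 2 and all(c in '0123456789' for c in rest)
def pvSuffixOk (p : String) (idnode : String) : Bool :=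
  let rest := PySem.Str.slice idnode (some (PySem.Str.len p)) none
  PySem.Str.startswith idnode p && (PySem.Str.len rest == 2) && rest.toList.all pvIsDigitChar

def CheckIDNode_alt (typenode : String) (idnode : String) : Bool :=
  let prefixes : PySem.Dict String String :=
    PySem.Dict.ofList [("RLACS", "RLACS"), ("RLTDS", "RLTDS"), ("THL_SENSOR", "THL")]
  match prefixes.get? typenode with
  | none => false
  | some p => pvSuffixOk p idnode

-- ===== PRECONDITION & SPEC =====
def Spec_CheckIDNode (typenode : String) (idnode : String) (out : Bool) : Prop := out = CheckIDNode_alt typenode idnode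
instance (typenode : String) (idnode : String) (out : Bool) : Decidable (Spec_CheckIDNode typenode idnode out) := by unfold Spec_CheckIDNode; infer_instance

-- ===== CLAIM (what is proved, stated in full; the proofs are below) =====
def Claim_equal_CheckIDNode : Prop := ∀ (typenode : String) (idnode : String), Dom_CheckIDNode typenode idnode → Spec_CheckIDNode typenode idnode (CheckIDNode typenode idnode)

-- ===== LEMMAS AND PROOFS =====

-- membership in one of A's generated id lists coincides with B's prefix + two-digit check
theorem contains_eq_suffixOk (L : List String) (p : String)
    (h1 : L.all (fun s => pvSuffixOk p s) = true)
    (h2 : ("0123456789".toList.all (fun c1 => "0123456789".toList.all (fun c2 =>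
            L.contains (String.ofList (p.toList ++ [c1, c2]))))) = true)
    (s : String) : L.contains s = pvSuffixOk p s := by
  rw [List.all_eq_true] at h1
  cases hc : L.contains s with
  | true =>
      rw [List.contains_iff_mem] at hc
      exact (h1 s hc).symm
  | false =>
      cases hbv : pvSuffixOk p s with
      | false => rfl
      | true =>
        exfalso
        unfold pvSuffixOk at hbv
        simp only [Bool.and_eq_true, beq_iff_eq] at hbv
        obtain ⟨⟨hpre, hlen⟩, hall⟩ := hbv
        have hpre' : p.toList <+: s.toList := by
          simp only [PySem.Str.startswith_eq] at hpre
          exact (PySem.Chars.startswith_iff _ _).mp hpre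
        have hrest : (PySem.Str.slice s (some (PySem.Str.len p)) none).toList
            = s.toList.drop p.toList.length := by
          simp [PySem.Str.slice, PySem.Chars.slice_eq_listSlice, PySem.Str.len,
            PySem.List.slice_from]
        have hlen2 : (s.toList.drop p.toList.length).length = 2 := by
          rw [PySem.Str.len_eq, hrest] at hlen
          omega
        obtain ⟨c1, c2, hcc⟩ := List.length_eq_two.mp hlen2
        have htake : s.toList.take p.toList.length = p.toList :=
          (List.prefix_iff_eq_take.mp hpre').symm
        have hs : s.toList = p.toList ++ [c1, c2] := by
          conv_lhs => rw [← List.take_append_drop p.toList.length s.toList]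
          rw [hcc, htake]
        rw [List.all_eq_true] at hall
        have hd1 : c1 ∈ "0123456789".toList := by
          have := hall c1 (by rw [hrest, hcc]; simp)
          simpa [pvIsDigitChar, List.contains_iff_mem] using this
        have hd2 : c2 ∈ "0123456789".toList := by
          have := hall c2 (by rw [hrest, hcc]; simp)
          simpa [pvIsDigitChar, List.contains_iff_mem] using this
        rw [List.all_eq_true] at h2
        have h2' := h2 c1 hd1
        rw [List.all_eq_true] at h2'
        have hmem := h2' c2 hd2
        rw [← hs, String.ofList_toList, hc] at hmem
        exact Bool.false_ne_true hmem

theorem rlacs_fact : ∀ (s : String),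
    ((PySem.List.pyRange 0 100 1).map (fun i => String.ofList ("RLACS".toList ++ pvFmt2 i))).contains s
      = pvSuffixOk "RLACS" s :=
  contains_eq_suffixOk _ _ (by decide) (by decide)

theorem rltds_fact : ∀ (s : String),
    ((PySem.List.pyRange 0 100 1).map (fun i => String.ofList ("RLTDS".toList ++ pvFmt2 i))).contains s
      = pvSuffixOk "RLTDS" s :=
  contains_eq_suffixOk _ _ (by decide) (by decide)

theorem thl_fact : ∀ (s : String),
    ((PySem.List.pyRange 0 100 1).map (fun i => String.ofList ("THL".toList ++ pvFmt2 i))).contains s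
      = pvSuffixOk "THL" s :=
  contains_eq_suffixOk _ _ (by decide) (by decide)

-- ===== VERDICT (by name: the statement is the Claim_ definition above) =====
theorem CheckIDNode_spec : Claim_equal_CheckIDNode := by
  intro typenode idnode _
  unfold Spec_CheckIDNode CheckIDNode CheckIDNode_alt
  by_cases h1 : typenode = "RLACS"
  · subst h1
    simp only [beq_self_eq_true, if_true]
    rw [show (PySem.Dict.ofList [("RLACS", "RLACS"), ("RLTDS", "RLTDS"), ("THL_SENSOR", "THL")] : PySem.Dict String String).get? "RLACS" = some "RLACS" from by decide]
    rw [rlacs_fact idnode]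
    cases h : pvSuffixOk "RLACS" idnode <;> simp [h]
  · by_cases h2 : typenode = "RLTDS"
    · subst h2
      simp only [beq_iff_eq, if_true]
      rw [show (PySem.Dict.ofList [("RLACS", "RLACS"), ("RLTDS", "RLTDS"), ("THL_SENSOR", "THL")] : PySem.Dict String String).get? "RLTDS" = some "RLTDS" from by decide]
      rw [rltds_fact idnode]
      cases h : pvSuffixOk "RLTDS" idnode <;> simp [h]
    · by_cases h3 : typenode = "THL_SENSOR"
      · subst h3
        simp only [beq_iff_eq, reduceIte]
        rw [show (PySem.Dict.ofList [("RLACS", "RLACS"), ("RLTDS", "RLTDS"), ("THL_SENSOR", "THL")] : PySem.Dict String String).get? "THL_SENSOR" = some "THL" from by decide]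
        rw [thl_fact idnode]
        cases h : pvSuffixOk "THL" idnode <;> simp [h]
      · have hitems : (PySem.Dict.empty.update [("RLACS", "RLACS"), ("RLTDS", "RLTDS"), ("THL_SENSOR", "THL")] : PySem.Dict String String).items = [("RLACS", "RLACS"), ("RLTDS", "RLTDS"), ("THL_SENSOR", "THL")] := by decide
        simp only [PySem.Dict.ofList, PySem.Dict.get?, hitems]
        simp only [List.find?]
        rw [show ("RLACS" == typenode) = false from beq_eq_false_iff_ne.mpr (Ne.symm h1),
            show ("RLTDS" == typenode) = false from beq_eq_false_iff_ne.mpr (Ne.symm h2),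
            show ("THL_SENSOR" == typenode) = false from beq_eq_false_iff_ne.mpr (Ne.symm h3)]
        simp [h1, h2, h3]
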